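-- pv_equiv track=rewrite | github.com/Victor1492Alvarez/Master-Thesis | App_GM_Generator.py | detect_input_candidates
-- ===== SOURCE A (Python) =====
-- from typing import Dict, List, Optional, Tuple
--
-- def detect_input_candidates(columns: List[str]) -> List[str]:
--     patterns = ["sh2", "h2", "mixed", "total mole flow", "mol/hr"]
--     scored = []
--     for col in columns:
--         text = str(col).strip().lower()
--         score = sum(1 for p in patterns if p in text)
--         if score > 0:
--             scored.append((col, score))
--     scored.sort(key=lambda x: (-x[1], str(x[0]).lower()))
--     return [name for name, _ in scored]
-- ===== SOURCE B (Python) =====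
-- def detect_input_candidates(columns):
--     patterns = ["sh2", "h2", "mixed", "total mole flow", "mol/hr"]
--     buckets = {}
--     for col in columns:
--         text = str(col).strip().lower()
--         score = sum(1 for p in patterns if p in text)
--         if score > 0:
--             buckets.setdefault(score, []).append(col)
--     result = []
--     for s in range(5, 0, -1):
--         if s in buckets:
--             result.extend(sorted(buckets[s], key=lambda c: str(c).lower()))
--     return result
-- ===== Notes on version B (the rewrite author's own statement) =====
-- stated objective: alternative
-- what changed: Replaces the collect-then-sort-by-(-score,lower) pass with bucketing column names into a dict keyed by score and emitting buckets from score 5 down to 1, each bucket sorted alphabetically by lowercase name.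
import Mathlib
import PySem

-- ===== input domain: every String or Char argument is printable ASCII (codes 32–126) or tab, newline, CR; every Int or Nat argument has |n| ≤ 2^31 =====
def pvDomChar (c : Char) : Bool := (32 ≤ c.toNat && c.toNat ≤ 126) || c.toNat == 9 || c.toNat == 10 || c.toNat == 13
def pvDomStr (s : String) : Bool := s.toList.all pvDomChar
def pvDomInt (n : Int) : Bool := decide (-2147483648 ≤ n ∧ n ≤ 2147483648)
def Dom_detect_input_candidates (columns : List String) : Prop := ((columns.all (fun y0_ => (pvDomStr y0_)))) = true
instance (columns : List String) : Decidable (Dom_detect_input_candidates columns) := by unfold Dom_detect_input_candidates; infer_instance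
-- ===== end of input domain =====

-- B buckets names by score into a dict and concatenates the buckets from score 5 down to 1,
-- each sorted alphabetically by lowercase name, instead of A's single sort by the tuple
-- (-score, lower name); same return value, similar cost (objective: alternative).

-- ===== PORT A =====
def pvPatterns : List String := ["sh2", "h2", "mixed", "total mole flow", "mol/hr"]

-- score = sum(1 for p in patterns if p in text), text = str(col).strip().lower() (identical in both Pythons)
def pvScore (col : String) : Int :=
  pvPatterns.foldl
    (fun n p => if PySem.Str.isIn p (PySem.Str.lower (PySem.Str.strip col)) then n + 1 else n) 0

def detect_input_candidates (columns : List String) : List String :=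
  let scored : List (String × Int) :=
    columns.foldl (fun acc col =>
      let score := pvScore col
      if score > 0 then acc ++ [(col, score)] else acc) []
  let sortedScored := PySem.List.sorted2 scored (fun x => -x.2) (fun x => PySem.Str.lower x.1)
  sortedScored.map (fun x => x.1)

-- ===== PORT B =====
def detect_input_candidates_alt (columns : List String) : List String :=
  let buckets : PySem.Dict Int (List String) :=
    columns.foldl (fun d col =>
      let score := pvScore col
      if score > 0 then d.modify score [] (· ++ [col]) else d) PySem.Dict.empty
  (PySem.List.pyRange 5 0 (-1)).foldl (fun acc s =>
    if buckets.contains s then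
      acc ++ PySem.List.sorted (buckets.getD s []) (fun c => PySem.Str.lower c)
    else acc) []

-- ===== PRECONDITION & SPEC =====
def Spec_detect_input_candidates (columns : List String) (out : List String) : Prop := out = detect_input_candidates_alt columns
instance (columns : List String) (out : List String) : Decidable (Spec_detect_input_candidates columns out) := by unfold Spec_detect_input_candidates; infer_instance

-- ===== CLAIM (what is proved, stated in full; the proofs are below) =====
def Claim_equal_detect_input_candidates : Prop := ∀ (columns : List String), Dom_detect_input_candidates columns → Spec_detect_input_candidates columns (detect_input_candidates columns)

-- ===== LEMMAS AND PROOFS =====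

-- the lexicographic "before" predicate of A's tuple-key sort
def pvLexB (a b : String × Int) : Bool :=
  decide ((-a.2 : Int) < -b.2) ||
    (!decide ((-b.2 : Int) < -a.2) && decide (PySem.Str.lower a.1 < PySem.Str.lower b.1))

-- the alphabetical "before" predicate of a bucket sort
def pvAlphaB (a b : String × Int) : Bool := decide (PySem.Str.lower a.1 < PySem.Str.lower b.1)

-- B's output at pair level: the buckets for the scores in S, concatenated
def pvBC (S : List Int) (xs : List (String × Int)) : List (String × Int) :=
  S.flatMap (fun s => PySem.List.sorted (xs.filter (fun y => y.2 == s)) (fun y => PySem.Str.lower y.1))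

theorem pvScore_bounds (c : String) : 0 ≤ pvScore c ∧ pvScore c ≤ 5 := by
  simp only [pvScore, pvPatterns, List.foldl]
  split_ifs <;> omega

theorem insertBy_skip {α : Type} (before : α → α → Bool) (x : α) (hi rest : List α)
    (h : ∀ y ∈ hi, before x y = false) :
    PySem.List.insertBy before x (hi ++ rest) = hi ++ PySem.List.insertBy before x rest := by
  induction hi with
  | nil => rfl
  | cons y ys ih =>
      simp only [List.cons_append, PySem.List.insertBy, h y (by simp)]
      simp only [Bool.false_eq_true, if_false, List.cons_inj_right]
      exact ih (fun z hz => h z (by simp [hz]))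

theorem insertBy_split {α : Type} (before before' : α → α → Bool) (x : α) (bs lo : List α)
    (h1 : ∀ y ∈ bs, before x y = before' x y) (h2 : ∀ y ∈ lo, before x y = true) :
    PySem.List.insertBy before x (bs ++ lo) = PySem.List.insertBy before' x bs ++ lo := by
  induction bs with
  | nil =>
      cases lo with
      | nil => rfl
      | cons z zs =>
          simp only [List.nil_append, PySem.List.insertBy, h2 z (by simp), if_true]
          rfl
  | cons y ys ih =>
      simp only [List.cons_append, PySem.List.insertBy, h1 y (by simp)]
      by_cases hb : before' x y = true
      · simp [hb]
      · simp only [hb, Bool.false_eq_true, if_false, List.cons_append, List.cons_inj_right]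
        exact ih (fun z hz => h1 z (by simp [hz]))

theorem sorted_snoc {α κ : Type} [LinearOrder κ] (xs : List α) (x : α) (key : α → κ) :
    PySem.List.sorted (xs ++ [x]) key =
      PySem.List.insertBy (fun a b => decide (key a < key b)) x (PySem.List.sorted xs key) := by
  rw [PySem.List.sorted_eq_foldl_insertBy, PySem.List.sorted_eq_foldl_insertBy, List.foldl_append]
  rfl

theorem sorted2A_eq_foldl (xs : List (String × Int)) :
    PySem.List.sorted2 xs (fun x => -x.2) (fun x => PySem.Str.lower x.1) =
      List.foldl (fun acc x => PySem.List.insertBy pvLexB x acc) [] xs := rfl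

theorem mem_bucket_score (xs : List (String × Int)) (s : Int) (y : String × Int)
    (hy : y ∈ PySem.List.sorted (xs.filter (fun y => y.2 == s)) (fun y => PySem.Str.lower y.1)) :
    y.2 = s := by
  rw [PySem.List.mem_sorted] at hy
  have := List.of_mem_filter hy
  simpa using this

theorem mem_pvBC (S : List Int) (xs : List (String × Int)) (y : String × Int)
    (hy : y ∈ pvBC S xs) : y.2 ∈ S := by
  simp only [pvBC, List.mem_flatMap] at hy
  obtain ⟨s, hs, hmem⟩ := hy
  rw [mem_bucket_score xs s y hmem]; exact hs

theorem pvBC_snoc_not_mem (S : List Int) (xs : List (String × Int)) (x : String × Int)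
    (h : x.2 ∉ S) : pvBC S (xs ++ [x]) = pvBC S xs := by
  induction S with
  | nil => rfl
  | cons s S' ih =>
      have hne : (x.2 == s) = false := by
        simp only [beq_eq_false_iff_ne, ne_eq]
        intro he; exact h (by simp [he])
      simp only [pvBC, List.flatMap_cons] at *
      rw [ih (fun hm => h (by simp [hm]))]
      congr 1
      rw [List.filter_append]
      simp [hne]

theorem pvBC_step (S : List Int) (hS : S.Pairwise (· > ·)) (x : String × Int) (hx : x.2 ∈ S)
    (xs : List (String × Int)) :
    PySem.List.insertBy pvLexB x (pvBC S xs) = pvBC S (xs ++ [x]) := by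
  induction S with
  | nil => cases hx
  | cons s S' ih =>
      have hlt : ∀ t ∈ S', t < s := fun t ht => List.rel_of_pairwise_cons hS ht
      have hbc : pvBC (s :: S') xs =
          PySem.List.sorted (xs.filter (fun y => y.2 == s)) (fun y => PySem.Str.lower y.1)
            ++ pvBC S' xs := by
        simp [pvBC]
      rcases (List.mem_cons.mp hx) with hxe | hxm
      · -- x's score is s: insert into the head bucket, tail buckets untouched
        rw [hbc, insertBy_split pvLexB pvAlphaB x _ _
          (by
            intro y hy
            have hys := mem_bucket_score xs s y hy
            simp only [pvLexB, pvAlphaB, hxe, hys]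
            simp)
          (by
            intro y hy
            have hyS := mem_pvBC S' xs y hy
            have hylt : y.2 < s := hlt _ hyS
            simp only [pvLexB, hxe, Bool.or_eq_true, decide_eq_true_eq]
            left; omega)]
        have hxs : x.2 ∉ S' := by
          intro hm; exact absurd (hlt _ hm) (by omega)
        have hfilter : (xs ++ [x]).filter (fun y => y.2 == s) =
            xs.filter (fun y => y.2 == s) ++ [x] := by
          rw [List.filter_append]; simp [hxe]
        simp only [pvBC, List.flatMap_cons]
        rw [hfilter, sorted_snoc]
        have hbc' : pvBC S' (xs ++ [x]) = pvBC S' xs := pvBC_snoc_not_mem S' xs x hxs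
        simp only [pvBC] at hbc'
        rw [hbc']
        rfl
      · -- x's score is lower: skip the head bucket
        have hxlt : x.2 < s := hlt _ hxm
        rw [hbc, insertBy_skip pvLexB x _ _
          (by
            intro y hy
            have hys := mem_bucket_score xs s y hy
            have h1 : ¬((-x.2 : Int) < -y.2) := by omega
            have h2 : (-y.2 : Int) < -x.2 := by omega
            simp [pvLexB, h1, h2])]
        rw [ih (List.Pairwise.of_cons hS) hxm]
        have hne : (x.2 == s) = false := by
          simp only [beq_eq_false_iff_ne, ne_eq]; omega
        simp only [pvBC, List.flatMap_cons]
        congr 1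
        rw [List.filter_append]; simp [hne]

theorem sorted2_eq_pvBC (xs : List (String × Int)) (h : ∀ x ∈ xs, 1 ≤ x.2 ∧ x.2 ≤ 5) :
    PySem.List.sorted2 xs (fun x => -x.2) (fun x => PySem.Str.lower x.1) =
      pvBC [5, 4, 3, 2, 1] xs := by
  induction xs using List.reverseRecOn with
  | nil => rfl
  | append_singleton xs x ih =>
      rw [sorted2A_eq_foldl, List.foldl_append, ← sorted2A_eq_foldl]
      simp only [List.foldl_cons, List.foldl_nil]
      rw [ih (fun y hy => h y (by simp [hy]))]
      refine pvBC_step _ (by decide) x ?_ xs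
      have := h x (by simp)
      have h1 := this.1; have h2 := this.2
      simp only [List.mem_cons, List.not_mem_nil, or_false]
      omega

theorem insertBy_map {α β : Type} (bf : β → β → Bool) (f : α → β) (x : α) (ys : List α) :
    PySem.List.insertBy bf (f x) (ys.map f) =
      (PySem.List.insertBy (fun a b => bf (f a) (f b)) x ys).map f := by
  induction ys with
  | nil => rfl
  | cons y ys ih =>
      simp only [List.map_cons, PySem.List.insertBy]
      by_cases hb : bf (f x) (f y) = true
      · simp [hb]
      · simp only [hb, Bool.false_eq_true, if_false, List.map_cons, List.cons_inj_right]
        exact ih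

theorem sorted_map_aux {α β κ : Type} [LinearOrder κ] (f : α → β) (key : β → κ)
    (l : List α) (acc : List α) :
    List.foldl (fun acc b => PySem.List.insertBy (fun a b => decide (key a < key b)) b acc)
        (acc.map f) (l.map f) =
      (List.foldl (fun acc a =>
          PySem.List.insertBy (fun a b => decide (key (f a) < key (f b))) a acc) acc l).map f := by
  induction l generalizing acc with
  | nil => rfl
  | cons a l ih =>
      simp only [List.map_cons, List.foldl_cons]
      rw [insertBy_map, ih]

theorem sorted_map {α β κ : Type} [LinearOrder κ] (f : α → β) (key : β → κ) (l : List α) :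
    PySem.List.sorted (l.map f) key = (PySem.List.sorted l (fun a => key (f a))).map f := by
  rw [PySem.List.sorted_eq_foldl_insertBy, PySem.List.sorted_eq_foldl_insertBy]
  exact sorted_map_aux f key l []

set_option maxHeartbeats 1000000 in
theorem detect_input_candidates_spec : Claim_equal_detect_input_candidates := by
  intro columns _
  unfold Spec_detect_input_candidates detect_input_candidates detect_input_candidates_alt
  simp only []
  set cols' := columns.filter (fun c => decide (pvScore c > 0)) with hcols'
  -- A's scored list is cols' paired with its scores
  have hA : (columns.foldl (fun acc col =>
      let score := pvScore col
      if score > 0 then acc ++ [(col, score)] else acc) ([] : List (String × Int))) =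
      cols'.map (fun c => (c, pvScore c)) := by
    rw [PySem.List.foldl_append_ite (fun col => pvScore col > 0) (fun col => (col, pvScore col))
      columns []]
    rfl
  rw [hA]
  -- B's dict bucket at key s is cols' filtered to score s
  have hbucket : ∀ s : Int,
      (columns.foldl (fun d col =>
        let score := pvScore col
        if score > 0 then d.modify score [] (· ++ [col]) else d) PySem.Dict.empty).getD s [] =
      cols'.filter (fun c => pvScore c == s) := by
    intro s
    show (List.foldl (fun d col =>
        if pvScore col > 0 then d.modify (pvScore col) [] (· ++ [col]) else d)
        PySem.Dict.empty columns).getD s [] = cols'.filter (fun c => pvScore c == s)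
    rw [show (List.foldl (fun d col =>
          if pvScore col > 0 then d.modify (pvScore col) [] (· ++ [col]) else d)
          (PySem.Dict.empty : PySem.Dict Int (List String)) columns) =
        List.foldl (fun d col => d.modify (pvScore col) [] (· ++ [col])) PySem.Dict.empty
          (columns.filter (fun col => decide (pvScore col > 0))) from
      PySem.List.foldl_ite_eq_foldl_filter _ _ columns _]
    rw [← hcols']
    have : cols'.foldl (fun d col => d.modify (pvScore col) [] (· ++ [col])) PySem.Dict.empty =
        (cols'.map (fun c => (pvScore c, c))).foldl
          (fun d p => d.modify p.1 [] (· ++ [p.2])) PySem.Dict.empty := by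
      rw [List.foldl_map]
    rw [this, PySem.Dict.getD_foldl_modify_append, PySem.Dict.getD_empty, List.nil_append,
      List.filter_map]
    rw [List.map_map]
    simp only [Function.comp_def]
    simp
  set buckets := columns.foldl (fun d col =>
      let score := pvScore col
      if score > 0 then d.modify score [] (· ++ [col]) else d) PySem.Dict.empty with hb
  -- B's per-score step appends the sorted bucket whether or not the key is present
  have hstep : (fun (acc : List String) (s : Int) =>
      if buckets.contains s then
        acc ++ PySem.List.sorted (buckets.getD s []) (fun c => PySem.Str.lower c)
      else acc) =
      fun acc s => acc ++ PySem.List.sorted (cols'.filter (fun c => pvScore c == s))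
        (fun c => PySem.Str.lower c) := by
    funext acc s
    by_cases hc : buckets.contains s = true
    · rw [if_pos hc, hbucket s]
    · rw [if_neg (by simp [hc])]
      have h0 : buckets.getD s [] = [] :=
        PySem.Dict.getD_of_not_contains buckets [] (by simpa using hc)
      rw [← hbucket s, h0]
      simp [PySem.List.sorted]
  rw [hstep]
  have hrange : PySem.List.pyRange 5 0 (-1) = [5, 4, 3, 2, 1] := by decide
  rw [hrange, PySem.List.foldl_append_eq_flatMap
    (fun s => PySem.List.sorted (cols'.filter (fun c => pvScore c == s))
      (fun c => PySem.Str.lower c)) [5, 4, 3, 2, 1] [], List.nil_append]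
  -- A's sorted2 decomposes into score buckets
  rw [sorted2_eq_pvBC (cols'.map (fun c => (c, pvScore c)))
    (by
      intro x hx
      simp only [List.mem_map] at hx
      obtain ⟨c, hc, rfl⟩ := hx
      have hmem := List.of_mem_filter hc
      have := pvScore_bounds c
      simp only [decide_eq_true_eq] at hmem
      constructor <;> omega)]
  simp only [pvBC, List.map_flatMap]
  apply List.flatMap_congr
  intro s _
  have hf : (cols'.map (fun c => (c, pvScore c))).filter (fun y => y.2 == s) =
      (cols'.filter (fun c => pvScore c == s)).map (fun c => (c, pvScore c)) := by
    rw [List.filter_map]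
    simp only [Function.comp_def]
  rw [hf, sorted_map (fun c => (c, pvScore c)) (fun y => PySem.Str.lower y.1)]
  rw [List.map_map]
  exact List.map_id _

-- ===== VERDICT (by name: the statement is the Claim_ definition above) =====
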